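-- pv_equiv track=rewrite | github.com/wyk18703232953/myResearch | codeComplex/data/filteredData/python/quadratic/python_quadratic_0354.py | generate_grid
-- ===== SOURCE A (Python) =====
-- def generate_grid(m, n):
--     # Deterministic grid generator of size m x n using simple arithmetic patterns
--     # Rule: cell is '*' if (i + j) % 3 == 0, else '.'
--     grid = []
--     for i in range(m):
--         row_chars = []
--         for j in range(n):
--             if (i + j) % 3 == 0:
--                 row_chars.append('*')
--             else:
--                 row_chars.append('.')
--         grid.append(''.join(row_chars))
--     return grid
-- ===== SOURCE B (Python) =====
-- def generate_grid(m, n):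
--     # There are only 3 distinct rows since a cell depends only on (i + j) % 3.
--     # Precompute the 3 templates once (O(n)), then assemble by indexing (O(m)).
--     if m <= 0:
--         return []
--     rows = [''.join('*' if (k + j) % 3 == 0 else '.' for j in range(n)) for k in range(3)]
--     return [rows[i % 3] for i in range(m)]
-- ===== Notes on version B (the rewrite author's own statement) =====
-- stated objective: faster
-- what changed: Exploits the period-3 structure: precomputes the 3 distinct row templates once and assembles the grid by indexing rows[i % 3], instead of re-deriving every cell with a nested per-cell loop.
import Mathlib
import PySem

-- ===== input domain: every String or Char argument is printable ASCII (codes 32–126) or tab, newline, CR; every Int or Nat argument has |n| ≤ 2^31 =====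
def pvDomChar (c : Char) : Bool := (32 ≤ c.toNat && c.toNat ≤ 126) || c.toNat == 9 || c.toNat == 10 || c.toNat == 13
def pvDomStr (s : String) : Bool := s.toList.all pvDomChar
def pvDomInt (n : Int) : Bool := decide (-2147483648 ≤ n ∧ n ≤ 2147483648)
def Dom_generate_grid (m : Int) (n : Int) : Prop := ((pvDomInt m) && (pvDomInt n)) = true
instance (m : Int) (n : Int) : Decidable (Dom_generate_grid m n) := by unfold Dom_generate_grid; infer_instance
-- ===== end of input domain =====

-- B precomputes the 3 distinct row templates and assembles the grid by indexing rows[i % 3] (period-3 structure); the per-cell double loop disappears.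
-- ===== PORT A =====
-- inner loop: row_chars built by appending one char per j, then ''.join
def gridRowA (i : Int) (n : Int) : String :=
  String.mk ((PySem.List.pyRange 0 n 1).foldl
    (fun row_chars j => row_chars ++ [if (i + j) % 3 == 0 then '*' else '.']) [])

def generate_grid (m : Int) (n : Int) : List String :=
  (PySem.List.pyRange 0 m 1).foldl (fun grid i => grid ++ [gridRowA i n]) []

-- ===== PORT B =====
-- one row template for residue k, built with a comprehension (map)
def gridRowB (k : Int) (n : Int) : String :=
  String.mk ((PySem.List.pyRange 0 n 1).map (fun j => if (k + j) % 3 == 0 then '*' else '.'))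

def generate_grid_alt (m : Int) (n : Int) : List String :=
  if m ≤ 0 then [] else
  let rows := (PySem.List.pyRange 0 3 1).map (fun k => gridRowB k n)
  (PySem.List.pyRange 0 m 1).map (fun i => (PySem.List.pyGet? rows (i % 3)).getD "")

-- ===== PRECONDITION & SPEC =====
def Spec_generate_grid (m : Int) (n : Int) (out : List String) : Prop := out = generate_grid_alt m n
instance (m : Int) (n : Int) (out : List String) : Decidable (Spec_generate_grid m n out) := by unfold Spec_generate_grid; infer_instance

-- ===== CLAIM (what is proved, stated in full; the proofs are below) =====
def Claim_equal_generate_grid : Prop := ∀ (m : Int) (n : Int), Dom_generate_grid m n → Spec_generate_grid m n (generate_grid m n)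

-- ===== LEMMAS AND PROOFS =====

-- ===== VERDICT (by name: the statement is the Claim_ definition above) =====
-- A's row i equals B's template for residue i % 3
lemma rowA_eq_rowB (i n : Int) : gridRowA i n = gridRowB (i % 3) n := by
  unfold gridRowA gridRowB
  rw [PySem.List.foldl_append_singleton_eq_map]
  congr 1
  apply List.map_congr_left
  intro j _
  have : (i + j) % 3 = (i % 3 + j) % 3 := by omega
  rw [this]

lemma rows_get (n i : Int) :
    (PySem.List.pyGet? ((PySem.List.pyRange 0 3 1).map (fun k => gridRowB k n)) (i % 3)).getD ""
      = gridRowB (i % 3) n := by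
  have h3 : PySem.List.pyRange 0 3 1 = [0, 1, 2] := by decide
  have hi : i % 3 = 0 ∨ i % 3 = 1 ∨ i % 3 = 2 := by omega
  rcases hi with h | h | h <;>
    simp [h3, h, PySem.List.pyGet?, PySem.List.pyIdx?]

theorem generate_grid_spec : Claim_equal_generate_grid := by
  intro m n _
  unfold Spec_generate_grid generate_grid generate_grid_alt
  rw [PySem.List.foldl_append_singleton_eq_map]
  by_cases hm : m ≤ 0
  · simp [hm, PySem.List.pyRange_one_eq_nil hm]
  simp only [if_neg hm]
  apply List.map_congr_left
  intro i _
  rw [rows_get, rowA_eq_rowB]
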